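-- pv_equiv track=rewrite | github.com/sillymilady/s2xml-compiler | src/s2xml_gui.py | _badge
-- ===== SOURCE A (Python) =====
-- C = {
--     "bg":       "#0f1117",
--     "surface":  "#1a1d27",
--     "panel":    "#22263a",
--     "border":   "#2e3250",
--     "accent":   "#c96b3f",
--     "accent2":  "#3f6bc9",
--     "success":  "#4aaa78",
--     "warn":     "#d4a843",
--     "error":    "#c94a4a",
--     "fg":       "#e8e8ec",
--     "fg2":      "#9399b0",
--     "fg3":      "#5a6080",
--     "select":   "#2e3a5a",
--     "hover":    "#2a2f45",
--     "entry_bg": "#13151f",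
-- }
--
-- TYPE_COLORS = {
--     "bhav":"#4aaa78","str":"#64b5f6","trcn":"#d4a843","tprp":"#ce93d8",
--     "objf":"#ff8a65","glob":"#80cbc4","objd":"#a5d6a7","ttab":"#ffcc02",
--     "bcon":"#ffab40","ctss":"#80deea","nref":"#ef9a9a","vers":"#b0bec5",
-- }
--
-- def _badge(name):
--     name = name.lower()
--     for ext, col in TYPE_COLORS.items():
--         if name.endswith(f".{ext}.xml"): return ext.upper(), col
--     if name.endswith(".png"): return "PNG", "#ce93d8"
--     if name.endswith(".jpg") or name.endswith(".jpeg"): return "JPG", "#80deea"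
--     if name.endswith(".bmp"): return "BMP", "#ffab40"
--     return "FILE", C["fg3"]
-- ===== SOURCE B (Python) =====
-- C = {
--     "bg":       "#0f1117",
--     "surface":  "#1a1d27",
--     "panel":    "#22263a",
--     "border":   "#2e3250",
--     "accent":   "#c96b3f",
--     "accent2":  "#3f6bc9",
--     "success":  "#4aaa78",
--     "warn":     "#d4a843",
--     "error":    "#c94a4a",
--     "fg":       "#e8e8ec",
--     "fg2":      "#9399b0",
--     "fg3":      "#5a6080",
--     "select":   "#2e3a5a",
--     "hover":    "#2a2f45",
--     "entry_bg": "#13151f",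
-- }
--
-- TYPE_COLORS = {
--     "bhav":"#4aaa78","str":"#64b5f6","trcn":"#d4a843","tprp":"#ce93d8",
--     "objf":"#ff8a65","glob":"#80cbc4","objd":"#a5d6a7","ttab":"#ffcc02",
--     "bcon":"#ffab40","ctss":"#80deea","nref":"#ef9a9a","vers":"#b0bec5",
-- }
--
-- def _badge(name):
--     n = name.lower()
--     if n.endswith(".xml"):
--         # parse the type tag (segment before the final suffix) and do one dict lookup
--         _, dot, ext = n[:-4].rpartition(".")
--         col = TYPE_COLORS.get(ext)
--         if dot and col is not None:
--             return ext.upper(), col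
--     if n.endswith(".png"): return "PNG", "#ce93d8"
--     if n.endswith(".jpg") or n.endswith(".jpeg"): return "JPG", "#80deea"
--     if n.endswith(".bmp"): return "BMP", "#ffab40"
--     return "FILE", C["fg3"]
-- ===== Notes on version B (the rewrite author's own statement) =====
-- stated objective: idiomatic
-- what changed: Replaces the 12-iteration endswith scan over TYPE_COLORS by parse-then-lookup: strip the 4-char xml suffix, rpartition off the segment after the last dot, and do a single dict lookup.
import Mathlib
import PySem

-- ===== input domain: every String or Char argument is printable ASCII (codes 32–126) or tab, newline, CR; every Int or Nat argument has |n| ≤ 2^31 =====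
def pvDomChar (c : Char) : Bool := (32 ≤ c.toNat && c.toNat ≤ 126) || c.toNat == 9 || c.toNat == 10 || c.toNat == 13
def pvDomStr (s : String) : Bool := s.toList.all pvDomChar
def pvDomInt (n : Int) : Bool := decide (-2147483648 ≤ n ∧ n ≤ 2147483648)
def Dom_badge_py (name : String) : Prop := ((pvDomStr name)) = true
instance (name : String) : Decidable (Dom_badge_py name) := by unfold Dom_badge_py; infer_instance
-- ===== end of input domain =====

-- B replaces A's 12-iteration per-key endswith scan by parse-then-lookup (strip the xml
-- suffix, rpartition at the last dot, one dict lookup); same result, no speed claim.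

-- the module constant TYPE_COLORS (shared data table, as key/value char lists in source order)
def typeColorsItems : List (List Char × List Char) :=
  [("bhav".toList, "#4aaa78".toList), ("str".toList, "#64b5f6".toList),
   ("trcn".toList, "#d4a843".toList), ("tprp".toList, "#ce93d8".toList),
   ("objf".toList, "#ff8a65".toList), ("glob".toList, "#80cbc4".toList),
   ("objd".toList, "#a5d6a7".toList), ("ttab".toList, "#ffcc02".toList),
   ("bcon".toList, "#ffab40".toList), ("ctss".toList, "#80deea".toList),
   ("nref".toList, "#ef9a9a".toList), ("vers".toList, "#b0bec5".toList)]

-- ===== PORT A =====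
-- the 'for ext, col in TYPE_COLORS.items(): if name.endswith(f".{ext}.xml"): return …' loop
def badgeScan : List (List Char × List Char) → List Char → Option (List Char × List Char)
  | [], _ => none
  | (ext, col) :: rest, n =>
    if PySem.Chars.endswith n ('.' :: (ext ++ ".xml".toList)) then
      some (PySem.Chars.upper ext, col)
    else badgeScan rest n

def badge_py (name : String) : String × String :=
  let n := PySem.Chars.lower name.toList
  match badgeScan typeColorsItems n with
  | some (e, c) => (String.ofList e, String.ofList c)
  | none =>
    if PySem.Chars.endswith n ".png".toList then ("PNG", "#ce93d8")
    else if PySem.Chars.endswith n ".jpg".toList || PySem.Chars.endswith n ".jpeg".toList then ("JPG", "#80deea")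
    else if PySem.Chars.endswith n ".bmp".toList then ("BMP", "#ffab40")
    else ("FILE", "#5a6080")   -- C["fg3"]

-- ===== PORT B =====
def typeColorsDict : PySem.Dict (List Char) (List Char) := ⟨typeColorsItems⟩

-- hand port of t.rpartition("."), exact for the one-character separator '.'
def rpartitionDot (t : List Char) : List Char × List Char × List Char :=
  let r := t.reverse
  let e := r.takeWhile (fun c => c != '.')
  if e.length = r.length then ([], [], t)
  else ((r.drop (e.length + 1)).reverse, ['.'], e.reverse)

def badge_py_alt (name : String) : String × String :=
  let n := PySem.Chars.lower name.toList
  let hit : Option (List Char × List Char) :=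
    if PySem.Chars.endswith n ".xml".toList then
      let p := rpartitionDot (PySem.Chars.slice n none (some (-4)))   -- n[:-4].rpartition(".")
      match PySem.Dict.get? typeColorsDict p.2.2 with                 -- TYPE_COLORS.get(ext)
      | some col => if p.2.1 ≠ [] then some (PySem.Chars.upper p.2.2, col) else none
      | none => none
    else none
  match hit with
  | some (e, c) => (String.ofList e, String.ofList c)
  | none =>
    if PySem.Chars.endswith n ".png".toList then ("PNG", "#ce93d8")
    else if PySem.Chars.endswith n ".jpg".toList || PySem.Chars.endswith n ".jpeg".toList then ("JPG", "#80deea")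
    else if PySem.Chars.endswith n ".bmp".toList then ("BMP", "#ffab40")
    else ("FILE", "#5a6080")

-- ===== PRECONDITION & SPEC =====
def Spec_badge_py (name : String) (out : String × String) : Prop := out = badge_py_alt name
instance (name : String) (out : String × String) : Decidable (Spec_badge_py name out) := by unfold Spec_badge_py; infer_instance

-- ===== CLAIM (what is proved, stated in full; the proofs are below) =====
def Claim_equal_badge_py : Prop := ∀ (name : String), Dom_badge_py name → Spec_badge_py name (badge_py name)

-- ===== LEMMAS AND PROOFS =====

-- a ++ b is a prefix of r iff a is and b is a prefix of what is left after a
lemma prefix_append_split {a b r : List Char} :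
    a ++ b <+: r ↔ (a <+: r ∧ b <+: r.drop a.length) := by
  constructor
  · rintro ⟨t, ht⟩
    subst ht
    refine ⟨⟨b ++ t, by simp⟩, ?_⟩
    rw [List.drop_append_of_le_length (by simp)]
    simp
  · rintro ⟨ha, hb⟩
    have h := List.prefix_append_drop ha
    rcases hb with ⟨t, ht⟩
    exact ⟨t, by rw [h, ← ht, List.append_assoc]⟩

-- w ++ "." is a prefix of s iff w is exactly the dot-free head of s and s contains a dot
lemma prefix_dot_iff {w s : List Char} (hw : '.' ∉ w) :
    (w ++ ['.'] <+: s) ↔ (s.takeWhile (fun c => c != '.') = w ∧ '.' ∈ s) := by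
  constructor
  · rintro ⟨t, ht⟩
    subst ht
    have hall : (List.takeWhile (fun c => c != '.') w).length = w.length := by
      have : List.takeWhile (fun c => c != '.') w = w := by
        rw [List.takeWhile_eq_self_iff]
        intro x hx
        simp only [bne_iff_ne, ne_eq]
        exact fun hxe => hw (hxe ▸ hx)
      rw [this]
    constructor
    · rw [List.append_assoc, List.takeWhile_append, if_pos hall]
      simp
    · simp
  · rintro ⟨htw, hmem⟩
    rcases hdm : s.dropWhile (fun c => c != '.') with _ | ⟨x, xs⟩
    · exfalso
      have hsplit := List.takeWhile_append_dropWhile (p := fun c => c != '.') (l := s)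
      rw [hdm, List.append_nil, htw] at hsplit
      rw [← hsplit] at hmem
      exact hw hmem
    · have hx : (x != '.') = false := by
        have h2 := List.head?_dropWhile_not (fun c => c != '.') s
        rw [hdm] at h2
        simpa using h2
      have hx' : x = '.' := by simpa using hx
      refine ⟨xs, ?_⟩
      have hsplit := List.takeWhile_append_dropWhile (p := fun c => c != '.') (l := s)
      rw [hdm, htw, hx'] at hsplit
      rw [← hsplit]
      simp

-- the loop of A, under a pointwise rewriting of its test, is a find?
lemma badgeScan_eq_find (l : List (List Char × List Char)) (n : List Char) (f : List Char → Bool)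
    (h : ∀ p ∈ l, PySem.Chars.endswith n ('.' :: (p.1 ++ ".xml".toList)) = f p.1) :
    badgeScan l n = (l.find? (fun p => f p.1)).map (fun p => (PySem.Chars.upper p.1, p.2)) := by
  induction l with
  | nil => simp [badgeScan]
  | cons p rest ih =>
    obtain ⟨ext, col⟩ := p
    rw [badgeScan, h ⟨ext, col⟩ (by simp)]
    by_cases hf : f ext
    · simp [List.find?, hf]
    · simp only [List.find?, hf, Bool.false_eq_true, if_false]
      exact ih (fun q hq => h q (by simp [hq]))

-- the dot-free tail of n[:-4] (reversed view)
def extRevOf (n : List Char) : List Char :=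
  (n.reverse.drop 4).takeWhile (fun c => c != '.')

-- dot presence in the stem, as a Bool
def dotIn (n : List Char) : Bool := decide ('.' ∈ n.reverse.drop 4)

-- the key characterisation: n ends with ".{k}.xml" iff n ends with ".xml", the stem
-- contains a dot, and the segment after the stem's last dot is exactly k
lemma endswith_key_iff {n k : List Char} (hk : '.' ∉ k) :
    PySem.Chars.endswith n ('.' :: (k ++ ".xml".toList)) =
      (PySem.Chars.endswith n ".xml".toList && dotIn n && (extRevOf n == k.reverse)) := by
  have hrev : ('.' :: (k ++ ".xml".toList)).reverse
      = ".xml".toList.reverse ++ (k.reverse ++ ['.']) := by simp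
  rw [Bool.eq_iff_iff]
  simp only [Bool.and_eq_true, beq_iff_eq]
  rw [PySem.Chars.endswith_iff, PySem.Chars.endswith_iff, ← List.reverse_prefix, ← List.reverse_prefix, hrev]
  rw [prefix_append_split]
  have h4 : (".xml".toList.reverse).length = 4 := by decide
  rw [h4]
  have hkrev : '.' ∉ k.reverse := by simpa using hk
  rw [prefix_dot_iff hkrev]
  unfold extRevOf dotIn
  constructor
  · rintro ⟨h1, h2, h3⟩
    exact ⟨⟨h1, by simpa using h3⟩, h2⟩
  · rintro ⟨⟨h1, h2⟩, h3⟩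
    exact ⟨h1, h3, by simpa using h2⟩

-- n[:-4] reversed is n.reverse.drop 4 once ".xml" is a suffix
lemma stem_reverse {n : List Char} (h : PySem.Chars.endswith n ".xml".toList = true) :
    (PySem.Chars.slice n none (some (-4))).reverse = n.reverse.drop 4 := by
  have hlen : 4 ≤ n.length := by
    rw [PySem.Chars.endswith_iff] at h
    simpa using h.length_le
  rw [PySem.Chars.slice_eq_listSlice, PySem.List.slice_to_neg_ofNat n 4 (by omega)]
  rw [List.reverse_take]
  congr 1
  omega

-- the dot test of rpartitionDot: takeWhile has full length iff there is no dot
lemma takeWhile_full_iff (s : List Char) :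
    (s.takeWhile (fun c => c != '.')).length = s.length ↔ '.' ∉ s := by
  constructor
  · intro h hmem
    have heq : s.takeWhile (fun c => c != '.') = s :=
      (List.takeWhile_prefix _).eq_of_length h
    have := List.mem_takeWhile_imp (heq ▸ hmem)
    simp at this
  · intro h
    have : s.takeWhile (fun c => c != '.') = s := by
      rw [List.takeWhile_eq_self_iff]
      intro x hx
      simp only [bne_iff_ne, ne_eq]
      exact fun hxe => h (hxe ▸ hx)
    rw [this]

-- the central equality: A's scan equals B's parse-then-lookup, for every char list
lemma scan_eq_parse (n : List Char) :
    badgeScan typeColorsItems n =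
      (if PySem.Chars.endswith n ".xml".toList then
        match PySem.Dict.get? typeColorsDict (rpartitionDot (PySem.Chars.slice n none (some (-4)))).2.2 with
        | some col =>
          if (rpartitionDot (PySem.Chars.slice n none (some (-4)))).2.1 ≠ [] then
            some (PySem.Chars.upper (rpartitionDot (PySem.Chars.slice n none (some (-4)))).2.2, col)
          else none
        | none => none
      else none) := by
  have hkeys : ∀ p ∈ typeColorsItems, '.' ∉ p.1 := by decide
  by_cases hxml : PySem.Chars.endswith n ".xml".toList = true
  case neg =>
    rw [if_neg hxml]
    rw [badgeScan_eq_find _ _ (fun _ => false) ?side]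
    · simp
    case side =>
      intro p hp
      rw [endswith_key_iff (hkeys p hp)]
      rw [Bool.not_eq_true] at hxml
      rw [hxml]
      simp
  case pos =>
    rw [if_pos hxml]
    have hstem := stem_reverse hxml
    set t := PySem.Chars.slice n none (some (-4)) with ht
    by_cases hdot : dotIn n = true
    · -- the stem contains a dot: rpartitionDot takes its else-branch
      have hmem : '.' ∈ t.reverse := by
        rw [hstem]
        unfold dotIn at hdot
        exact of_decide_eq_true hdot
      have hne : ¬ ((t.reverse.takeWhile (fun c => c != '.')).length = t.reverse.length) := by
        rw [takeWhile_full_iff]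
        exact fun h => h hmem
      have hew : t.reverse.takeWhile (fun c => c != '.') = extRevOf n := by
        rw [hstem]; rfl
      have h21 : (rpartitionDot t).2.1 = ['.'] := by
        unfold rpartitionDot
        rw [if_neg hne]
      have h22 : (rpartitionDot t).2.2 = (extRevOf n).reverse := by
        unfold rpartitionDot
        rw [if_neg hne, hew]
      rw [h21, h22]
      rw [badgeScan_eq_find _ _ (fun k => k == (extRevOf n).reverse) ?side2]
      · cases hfind : typeColorsItems.find? (fun p => p.1 == (extRevOf n).reverse) with
        | none => simp [PySem.Dict.get?, typeColorsDict, hfind]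
        | some q =>
          have hq : q.1 = (extRevOf n).reverse := by
            have := List.find?_some hfind
            simpa using this
          simp [PySem.Dict.get?, typeColorsDict, hfind, hq]
      case side2 =>
        intro p hp
        rw [endswith_key_iff (hkeys p hp), hxml, hdot]
        simp only [Bool.true_and]
        rw [Bool.eq_iff_iff]
        simp only [beq_iff_eq]
        constructor
        · intro h; rw [h, List.reverse_reverse]
        · intro h; rw [h, List.reverse_reverse]
    · -- no dot in the stem: A matches no key, B's rpartition yields an empty separator
      have hnomem : '.' ∉ t.reverse := by
        rw [hstem]
        unfold dotIn at hdot
        simpa using hdot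
      have heq : (t.reverse.takeWhile (fun c => c != '.')).length = t.reverse.length :=
        (takeWhile_full_iff _).mpr hnomem
      have h21 : (rpartitionDot t).2.1 = [] := by
        unfold rpartitionDot
        rw [if_pos heq]
      rw [h21]
      rw [badgeScan_eq_find _ _ (fun _ => false) ?side3]
      · cases typeColorsDict.get? (rpartitionDot t).2.2 <;> simp
      case side3 =>
        intro p hp
        rw [endswith_key_iff (hkeys p hp), hxml]
        rw [Bool.not_eq_true] at hdot
        simp [hdot]

-- ===== VERDICT (by name: the statement is the Claim_ definition above) =====
theorem badge_py_spec : Claim_equal_badge_py := by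
  intro name _
  unfold Spec_badge_py badge_py badge_py_alt
  simp only [scan_eq_parse]
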